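-- pv_equiv track=rewrite | github.com/eric1610/Programming_Practice | CodeJam_2019_Practice_Round/KickstartAlarm.py | eff_calc_alarm
-- ===== SOURCE A (Python) =====
-- mod = 10 ** 9 + 7
--
-- def pow(base, exp):
--     temp = 1
--     if base == 1 or exp == 1:
--         return base
--     elif exp == 0:
--         return 1
--     else:
--         temp = base if exp % 2 == 1 else 1
--         return temp * pow(base * base, exp // 2)
--
-- def eff_calc_alarm(n, k, arr):
--     result = arr[0] * n * k
--     mult = 0
--     for i in range(n - 1, 0, -1):
--         result += (arr[i] * (n - i) * k)
--         mult += (arr[i] * (n - i))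
--         result = result + (mult * (1 - pow(i + 1, k + 1)) // -i) - mult
--         result %= mod
--     return result
-- ===== SOURCE B (Python) =====
-- MOD = 10 ** 9 + 7
--
-- def _powmod(b, e):
--     # b^e mod MOD, iterative square-and-multiply on machine-sized residues
--     r = 1
--     b %= MOD
--     while e > 0:
--         if e & 1:
--             r = r * b % MOD
--         b = b * b % MOD
--         e >>= 1
--     return r
--
-- def _geo(r, m):
--     # (1 + r + ... + r^(m-1)) mod MOD, divide and conquer, O(log^2 m)
--     if m <= 0:
--         return 0
--     if m % 2 == 1:
--         return (_geo(r, m - 1) + _powmod(r, m - 1)) % MOD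
--     h = m // 2
--     return _geo(r, h) * (1 + _powmod(r, h)) % MOD
--
-- def eff_calc_alarm(n, k, arr):
--     if n <= 1:
--         return arr[0] * n * k
--     result = arr[0] * n * k % MOD
--     mult = 0
--     for i in range(n - 1, 0, -1):
--         c = arr[i] * (n - i)
--         mult = (mult + c) % MOD
--         result = (result + c * k + mult * (_geo(i + 1, k + 1) - 1)) % MOD
--     return result
-- ===== Notes on version B (the rewrite author's own statement) =====
-- stated objective: faster
-- what changed: A computes the exact bignum power (i+1)^(k+1) via recursive squaring and an exact floor division by -i each iteration; B never forms big integers: it uses iterative modular square-and-multiply and a divide-and-conquer geometric sum mod 1e9+7, keeping every intermediate reduced.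
import Mathlib
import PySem

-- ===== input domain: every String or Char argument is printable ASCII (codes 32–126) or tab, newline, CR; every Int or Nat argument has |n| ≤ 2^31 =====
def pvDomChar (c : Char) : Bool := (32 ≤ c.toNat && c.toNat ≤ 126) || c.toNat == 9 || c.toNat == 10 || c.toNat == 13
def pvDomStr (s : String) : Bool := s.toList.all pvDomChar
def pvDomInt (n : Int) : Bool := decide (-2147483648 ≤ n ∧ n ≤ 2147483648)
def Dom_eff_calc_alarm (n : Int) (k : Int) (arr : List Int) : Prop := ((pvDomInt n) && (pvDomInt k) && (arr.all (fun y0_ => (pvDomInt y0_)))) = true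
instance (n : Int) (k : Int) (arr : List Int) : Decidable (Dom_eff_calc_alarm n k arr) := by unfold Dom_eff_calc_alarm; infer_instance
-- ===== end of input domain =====

-- B replaces A's exact bignum power and exact division by a modular square-and-multiply
-- power and a divide-and-conquer geometric sum, reducing mod 1e9+7 throughout (faster in a timing run).

-- ===== PORT A =====

-- A's recursive exact pow. The Nat fuel (initialised to exp.toNat + 1, an upper bound on the
-- recursion depth since exp halves) only makes the same computation total; Python diverges
-- (infinite recursion) for exp < 0 with base ≠ 1, so the port returns a junk value 1 there
-- (those inputs lie outside Pre_).
def powAGo (base exp : Int) : Nat → Int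
  | 0 => 1
  | fuel + 1 =>
    if base = 1 ∨ exp = 1 then base
    else if exp = 0 then 1
    else if exp < 0 then 1
    else (if PySem.Int.mod exp 2 = 1 then base else 1) *
      powAGo (base * base) (PySem.Int.floordiv exp 2) fuel

def powA (base exp : Int) : Int := powAGo base exp (exp.toNat + 1)

-- one iteration of A's loop body; state = (result, mult); arr[i] via pyGet? (IndexError excluded by Pre_)
def stepA (n k : Int) (arr : List Int) (st : Int × Int) (i : Int) : Int × Int :=
  let result := st.1 + (PySem.List.pyGet? arr i).getD 0 * (n - i) * k
  let mult := st.2 + (PySem.List.pyGet? arr i).getD 0 * (n - i)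
  let result := result + PySem.Int.floordiv (mult * (1 - powA (i + 1) (k + 1))) (-i) - mult
  (PySem.Int.mod result 1000000007, mult)

def eff_calc_alarm (n : Int) (k : Int) (arr : List Int) : Int :=
  let result := (PySem.List.pyGet? arr 0).getD 0 * n * k
  ((PySem.List.pyRange (n - 1) 0 (-1)).foldl (stepA n k arr) (result, 0)).1

-- ===== PORT B =====

-- b._powmod's while loop: state (r, b), e halves each round (e & 1 = e % 2, e >> 1 = e // 2 for
-- e ≥ 0); the Nat fuel e.toNat + 1 bounds the number of rounds and only makes the loop total.
def powmodAuxGo (r b e : Int) : Nat → Int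
  | 0 => r
  | fuel + 1 =>
    if 0 < e then
      powmodAuxGo (if PySem.Int.mod e 2 = 1 then PySem.Int.mod (r * b) 1000000007 else r)
        (PySem.Int.mod (b * b) 1000000007) (PySem.Int.floordiv e 2) fuel
    else r

def powmodB (b e : Int) : Int := powmodAuxGo 1 (PySem.Int.mod b 1000000007) e (e.toNat + 1)

-- b._geo; the Nat fuel m.toNat + 1 bounds the recursion depth (m drops by at least 1 each call)
def geoBGo (r m : Int) : Nat → Int
  | 0 => 0
  | fuel + 1 =>
    if m ≤ 0 then 0
    else if PySem.Int.mod m 2 = 1 then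
      PySem.Int.mod (geoBGo r (m - 1) fuel + powmodB r (m - 1)) 1000000007
    else
      PySem.Int.mod (geoBGo r (PySem.Int.floordiv m 2) fuel *
        (1 + powmodB r (PySem.Int.floordiv m 2))) 1000000007

def geoB (r m : Int) : Int := geoBGo r m (m.toNat + 1)

-- one iteration of B's loop body; state = (result, mult)
def stepB (n k : Int) (arr : List Int) (st : Int × Int) (i : Int) : Int × Int :=
  let c := (PySem.List.pyGet? arr i).getD 0 * (n - i)
  let mult := PySem.Int.mod (st.2 + c) 1000000007
  (PySem.Int.mod (st.1 + c * k + mult * (geoB (i + 1) (k + 1) - 1)) 1000000007, mult)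

def eff_calc_alarm_alt (n : Int) (k : Int) (arr : List Int) : Int :=
  if n ≤ 1 then (PySem.List.pyGet? arr 0).getD 0 * n * k
  else
    let result := PySem.Int.mod ((PySem.List.pyGet? arr 0).getD 0 * n * k) 1000000007
    ((PySem.List.pyRange (n - 1) 0 (-1)).foldl (stepB n k arr) (result, 0)).1

-- ===== PRECONDITION & SPEC =====
-- Pre_ excludes exactly the inputs where Python A does not return: arr = [] or n > len(arr)
-- (IndexError on arr[0] / arr[i]), and k ≤ -2 with n ≥ 2 (pow(i+1, k+1) recurses forever).
def Pre_eff_calc_alarm (n : Int) (k : Int) (arr : List Int) : Prop :=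
  arr ≠ [] ∧ n ≤ (arr.length : Int) ∧ (n ≤ 1 ∨ -1 ≤ k)
instance (n : Int) (k : Int) (arr : List Int) : Decidable (Pre_eff_calc_alarm n k arr) := by
  unfold Pre_eff_calc_alarm; infer_instance

def pvWitness_eff_calc_alarm : Int × Int × List Int := (3, 2, [5, 1, 4])

def Spec_eff_calc_alarm (n : Int) (k : Int) (arr : List Int) (out : Int) : Prop := out = eff_calc_alarm_alt n k arr
instance (n : Int) (k : Int) (arr : List Int) (out : Int) : Decidable (Spec_eff_calc_alarm n k arr out) := by unfold Spec_eff_calc_alarm; infer_instance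

-- ===== CLAIM (what is proved, stated in full; the proofs are below) =====
def Claim_equal_eff_calc_alarm : Prop := ∀ (n : Int) (k : Int) (arr : List Int), Dom_eff_calc_alarm n k arr → Pre_eff_calc_alarm n k arr → Spec_eff_calc_alarm n k arr (eff_calc_alarm n k arr)

-- ===== LEMMAS AND PROOFS =====

-- A's pow computes the exact power for every nonnegative exponent
theorem powAGo_correct : ∀ (fuel m : Nat) (b : Int), m < fuel → powAGo b (m : Int) fuel = b ^ m := by
  intro fuel
  induction fuel with
  | zero => intro m b h; omega
  | succ fuel ih =>
    intro m b h
    show (if b = 1 ∨ (m : Int) = 1 then b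
      else if (m : Int) = 0 then 1
      else if (m : Int) < 0 then 1
      else (if PySem.Int.mod (m : Int) 2 = 1 then b else 1) *
        powAGo (b * b) (PySem.Int.floordiv (m : Int) 2) fuel) = b ^ m
    by_cases hb : b = 1
    · simp [hb]
    by_cases hm1 : m = 1
    · simp [hb, hm1]
    by_cases hm0 : m = 0
    · simp [hb, hm0]
    have hm2 : 2 ≤ m := by omega
    have hcast1 : (m : Int) ≠ 1 := by exact_mod_cast hm1
    have hcast0 : (m : Int) ≠ 0 := by exact_mod_cast hm0
    rw [if_neg (by tauto), if_neg hcast0, if_neg (by omega)]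
    have hfd : PySem.Int.floordiv (m : Int) 2 = ((m / 2 : Nat) : Int) := by
      exact_mod_cast PySem.Int.floordiv_natCast m 2
    have hmd : PySem.Int.mod (m : Int) 2 = ((m % 2 : Nat) : Int) := by
      exact_mod_cast PySem.Int.mod_natCast m 2
    rw [hfd, hmd, ih (m / 2) (b * b) (by omega)]
    have hsq : (b * b) ^ (m / 2) = b ^ (2 * (m / 2)) := by
      rw [mul_pow, two_mul, pow_add]
    by_cases hpar : m % 2 = 1
    · rw [if_pos (by exact_mod_cast hpar), hsq, ← pow_succ']
      congr 1; omega
    · rw [if_neg (show ¬((m % 2 : Nat) : Int) = 1 by omega), hsq, one_mul]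
      congr 1; omega

theorem powA_correct (b e : Int) (he : 0 ≤ e) : powA b e = b ^ e.toNat := by
  show powAGo b e (e.toNat + 1) = b ^ e.toNat
  have h : e = ((e.toNat : Nat) : Int) := by omega
  conv_lhs => rw [h]
  exact powAGo_correct (e.toNat + 1) e.toNat b (by omega)

-- reduction mod 1e9+7 is a congruence
theorem mod_modeq (a : Int) : PySem.Int.mod a 1000000007 ≡ a [ZMOD 1000000007] := by
  rw [PySem.Int.mod_eq_emod_of_pos (by omega)]
  exact Int.emod_emod_of_dvd a dvd_rfl

-- b._powmod computes the modular power
theorem powmodAuxGo_modeq : ∀ (fuel : Nat) (r b e : Int), e.toNat < fuel → 0 ≤ e →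
    powmodAuxGo r b e fuel ≡ r * b ^ e.toNat [ZMOD 1000000007] := by
  intro fuel
  induction fuel with
  | zero => intro r b e h _; omega
  | succ fuel ih =>
    intro r b e h he
    show (if 0 < e then
        powmodAuxGo (if PySem.Int.mod e 2 = 1 then PySem.Int.mod (r * b) 1000000007 else r)
          (PySem.Int.mod (b * b) 1000000007) (PySem.Int.floordiv e 2) fuel
      else r) ≡ r * b ^ e.toNat [ZMOD 1000000007]
    by_cases hpos : 0 < e
    · rw [if_pos hpos]
      have hfd : PySem.Int.floordiv e 2 = e / 2 :=
        PySem.Int.floordiv_eq_ediv_of_pos (by omega)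
      rw [hfd]
      have hrec := ih
        (if PySem.Int.mod e 2 = 1 then PySem.Int.mod (r * b) 1000000007 else r)
        (PySem.Int.mod (b * b) 1000000007) (e / 2) (by omega) (by omega)
      refine hrec.trans ?_
      have hb2 : (PySem.Int.mod (b * b) 1000000007) ^ (e / 2).toNat ≡ (b * b) ^ (e / 2).toNat [ZMOD 1000000007] :=
        (mod_modeq (b * b)).pow _
      have hbb : (b * b) ^ (e / 2).toNat = b ^ (2 * (e / 2).toNat) := by
        rw [mul_pow, two_mul, pow_add]
      by_cases hpar : PySem.Int.mod e 2 = 1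
      · rw [if_pos hpar]
        have hodd : 2 * (e / 2).toNat + 1 = e.toNat := by
          rw [PySem.Int.mod_eq_emod_of_pos (by omega : (0:Int) < 2)] at hpar
          omega
        calc PySem.Int.mod (r * b) 1000000007 * (PySem.Int.mod (b * b) 1000000007) ^ (e / 2).toNat
            ≡ r * b * (b * b) ^ (e / 2).toNat [ZMOD 1000000007] := (mod_modeq (r * b)).mul hb2
          _ = r * b ^ e.toNat := by rw [hbb, ← hodd, pow_succ]; ring
      · rw [if_neg hpar]
        have heven : 2 * (e / 2).toNat = e.toNat := by
          rw [PySem.Int.mod_eq_emod_of_pos (by omega : (0:Int) < 2)] at hpar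
          omega
        calc r * (PySem.Int.mod (b * b) 1000000007) ^ (e / 2).toNat
            ≡ r * (b * b) ^ (e / 2).toNat [ZMOD 1000000007] := (Int.ModEq.refl r).mul hb2
          _ = r * b ^ e.toNat := by rw [hbb, heven]
    · rw [if_neg hpos]
      have h0 : e.toNat = 0 := by omega
      rw [h0, pow_zero, mul_one]

theorem powmodB_modeq (b e : Int) (he : 0 ≤ e) :
    powmodB b e ≡ b ^ e.toNat [ZMOD 1000000007] := by
  have h := powmodAuxGo_modeq (e.toNat + 1) 1 (PySem.Int.mod b 1000000007) e (by omega) he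
  refine h.trans ?_
  rw [one_mul]
  exact (mod_modeq b).pow _

-- doubling identity for geometric sums (r ≠ 1)
theorem geo_sum_double (r : Int) (hr : r ≠ 1) (h : Nat) :
    (∑ j ∈ Finset.range h, r ^ j) * (1 + r ^ h) = ∑ j ∈ Finset.range (2 * h), r ^ j := by
  have h1 := geom_sum_mul r h
  have h2 := geom_sum_mul r (2 * h)
  have hp : r ^ (2 * h) = r ^ h * r ^ h := by rw [two_mul, pow_add]
  apply mul_right_cancel₀ (sub_ne_zero.mpr hr)
  calc (∑ j ∈ Finset.range h, r ^ j) * (1 + r ^ h) * (r - 1)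
      = (∑ j ∈ Finset.range h, r ^ j) * (r - 1) * (1 + r ^ h) := by ring
    _ = (r ^ h - 1) * (1 + r ^ h) := by rw [h1]
    _ = r ^ (2 * h) - 1 := by rw [hp]; ring
    _ = (∑ j ∈ Finset.range (2 * h), r ^ j) * (r - 1) := h2.symm

-- b._geo computes the geometric sum mod 1e9+7
theorem geoBGo_modeq : ∀ (fuel : Nat) (r m : Int), m.toNat < fuel → 2 ≤ r →
    geoBGo r m fuel ≡ ∑ j ∈ Finset.range m.toNat, r ^ j [ZMOD 1000000007] := by
  intro fuel
  induction fuel with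
  | zero => intro r m h _; omega
  | succ fuel ih =>
    intro r m hfu hr
    show (if m ≤ 0 then 0
      else if PySem.Int.mod m 2 = 1 then
        PySem.Int.mod (geoBGo r (m - 1) fuel + powmodB r (m - 1)) 1000000007
      else
        PySem.Int.mod (geoBGo r (PySem.Int.floordiv m 2) fuel *
          (1 + powmodB r (PySem.Int.floordiv m 2))) 1000000007)
      ≡ ∑ j ∈ Finset.range m.toNat, r ^ j [ZMOD 1000000007]
    by_cases h0 : m ≤ 0
    · rw [if_pos h0]
      have hz : m.toNat = 0 := by omega
      rw [hz]; simp
    · rw [if_neg h0]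
      by_cases hpar : PySem.Int.mod m 2 = 1
      · rw [if_pos hpar]
        have hrec := ih r (m - 1) (by omega) hr
        have hpow := powmodB_modeq r (m - 1) (by omega)
        refine (mod_modeq _).trans ?_
        have hsplit : m.toNat = (m - 1).toNat + 1 := by omega
        rw [hsplit, Finset.sum_range_succ]
        exact hrec.add hpow
      · rw [if_neg hpar]
        have hmod2 : m % 2 = 0 := by
          rw [PySem.Int.mod_eq_emod_of_pos (by omega : (0:Int) < 2)] at hpar; omega
        have hfd : PySem.Int.floordiv m 2 = m / 2 :=
          PySem.Int.floordiv_eq_ediv_of_pos (by omega)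
        rw [hfd]
        have hrec := ih r (m / 2) (by omega) hr
        have hpow := powmodB_modeq r (m / 2) (by omega)
        refine (mod_modeq _).trans ?_
        have hstep : geoBGo r (m / 2) fuel * (1 + powmodB r (m / 2)) ≡
            (∑ j ∈ Finset.range (m / 2).toNat, r ^ j) * (1 + r ^ (m / 2).toNat)
            [ZMOD 1000000007] :=
          hrec.mul ((Int.ModEq.refl 1).add hpow)
        refine hstep.trans ?_
        rw [geo_sum_double r (by omega) ((m / 2).toNat)]
        have hh : 2 * (m / 2).toNat = m.toNat := by omega
        rw [hh]

theorem geoB_modeq (r m : Int) (hr : 2 ≤ r) :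
    geoB r m ≡ ∑ j ∈ Finset.range m.toNat, r ^ j [ZMOD 1000000007] :=
  geoBGo_modeq (m.toNat + 1) r m (by omega) hr

-- A's exact division step equals mult * (geometric sum): the numerator is an exact multiple of -i
theorem floordiv_step (i mu k : Int) (hi : 1 ≤ i) (hk : 0 ≤ k + 1) :
    PySem.Int.floordiv (mu * (1 - powA (i + 1) (k + 1))) (-i)
      = mu * (∑ j ∈ Finset.range (k + 1).toNat, (i + 1) ^ j) := by
  have hpow := powA_correct (i + 1) (k + 1) hk
  have hgeom := geom_sum_mul (i + 1) (k + 1).toNat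
  have hnum : mu * (1 - powA (i + 1) (k + 1))
      = -i * (mu * ∑ j ∈ Finset.range (k + 1).toNat, (i + 1) ^ j) := by
    rw [hpow]
    have : (1 : Int) - (i + 1) ^ (k + 1).toNat
        = -((∑ j ∈ Finset.range (k + 1).toNat, (i + 1) ^ j) * ((i + 1) - 1)) := by
      rw [hgeom]; ring
    rw [this]; ring
  rw [hnum]
  show Int.fdiv _ _ = _
  exact Int.mul_fdiv_cancel_left _ (by omega)

-- loop invariant: congruent states stay congruent, and after any iteration the results are EQUAL
theorem loop_invariant (n k : Int) (arr : List Int) (hk : 0 ≤ k + 1) :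
    ∀ l : List Int, (∀ i ∈ l, 1 ≤ i) → ∀ sA sB : Int × Int,
      sA.1 ≡ sB.1 [ZMOD 1000000007] → sA.2 ≡ sB.2 [ZMOD 1000000007] →
      ((l.foldl (stepA n k arr) sA).1 ≡ (l.foldl (stepB n k arr) sB).1 [ZMOD 1000000007]) ∧
      ((l.foldl (stepA n k arr) sA).2 ≡ (l.foldl (stepB n k arr) sB).2 [ZMOD 1000000007]) ∧
      (l ≠ [] → (l.foldl (stepA n k arr) sA).1 = (l.foldl (stepB n k arr) sB).1) := by
  intro l
  induction l with
  | nil => intro _ sA sB h1 h2; exact ⟨h1, h2, fun h => absurd rfl h⟩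
  | cons i t iht =>
    intro hmem sA sB h1 h2
    have hi : 1 ≤ i := hmem i (List.mem_cons_self ..)
    simp only [List.foldl_cons]
    -- one step
    set ai := (PySem.List.pyGet? arr i).getD 0 with hai
    have hstepA : stepA n k arr sA i =
        (PySem.Int.mod (sA.1 + ai * (n - i) * k + (sA.2 + ai * (n - i)) *
          ((∑ j ∈ Finset.range (k + 1).toNat, (i + 1) ^ j) - 1)) 1000000007,
         sA.2 + ai * (n - i)) := by
      show (PySem.Int.mod (sA.1 + ai * (n - i) * k +
        PySem.Int.floordiv ((sA.2 + ai * (n - i)) * (1 - powA (i + 1) (k + 1))) (-i) -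
        (sA.2 + ai * (n - i))) 1000000007, sA.2 + ai * (n - i)) = _
      rw [floordiv_step i (sA.2 + ai * (n - i)) k hi hk]
      congr 1
      ring_nf
    have hmultB : (stepB n k arr sB i).2 = PySem.Int.mod (sB.2 + ai * (n - i)) 1000000007 := rfl
    have hmcong : sA.2 + ai * (n - i) ≡ (stepB n k arr sB i).2 [ZMOD 1000000007] := by
      rw [hmultB]
      exact (h2.add (Int.ModEq.refl _)).trans (mod_modeq _).symm
    have hgeo : (∑ j ∈ Finset.range (k + 1).toNat, (i + 1) ^ j) ≡ geoB (i + 1) (k + 1)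
        [ZMOD 1000000007] := (geoB_modeq (i + 1) (k + 1) (by omega)).symm
    have hrcong : (stepA n k arr sA i).1 = (stepB n k arr sB i).1 := by
      rw [hstepA]
      show PySem.Int.mod _ 1000000007 =
        PySem.Int.mod (sB.1 + ai * (n - i) * k + (stepB n k arr sB i).2 *
          (geoB (i + 1) (k + 1) - 1)) 1000000007
      have hcong : sA.1 + ai * (n - i) * k + (sA.2 + ai * (n - i)) *
            ((∑ j ∈ Finset.range (k + 1).toNat, (i + 1) ^ j) - 1)
          ≡ sB.1 + ai * (n - i) * k + (stepB n k arr sB i).2 *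
            (geoB (i + 1) (k + 1) - 1) [ZMOD 1000000007] :=
        (h1.add (Int.ModEq.refl _)).add (hmcong.mul (hgeo.sub (Int.ModEq.refl 1)))
      rw [PySem.Int.mod_eq_emod_of_pos (by omega), PySem.Int.mod_eq_emod_of_pos (by omega)]
      exact hcong
    have hrcong' : (stepA n k arr sA i).1 ≡ (stepB n k arr sB i).1 [ZMOD 1000000007] := by
      rw [hrcong]
    have hmcong' : (stepA n k arr sA i).2 ≡ (stepB n k arr sB i).2 [ZMOD 1000000007] := by
      rw [hstepA]; exact hmcong
    have ihres := iht (fun j hj => hmem j (List.mem_cons_of_mem _ hj))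
      (stepA n k arr sA i) (stepB n k arr sB i) hrcong' hmcong'
    refine ⟨ihres.1, ihres.2.1, fun _ => ?_⟩
    rcases List.eq_nil_or_concat t with ht | ⟨t', a, ht⟩
    · rw [ht]; simpa [ht] using hrcong
    · refine ihres.2.2 (by rw [ht]; simp)

-- ===== VERDICT (by name: the statement is the Claim_ definition above) =====
theorem eff_calc_alarm_spec : Claim_equal_eff_calc_alarm := by
  intro n k arr _ hpre
  obtain ⟨-, -, hnk⟩ := hpre
  unfold Spec_eff_calc_alarm eff_calc_alarm eff_calc_alarm_alt
  by_cases hn : n ≤ 1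
  · rw [if_pos hn, PySem.List.pyRange_neg_one_eq_nil (by omega : n - 1 ≤ 0)]
    simp
  · rw [if_neg hn]
    have hk : 0 ≤ k + 1 := by omega
    have hne : PySem.List.pyRange (n - 1) 0 (-1) ≠ [] := by
      rw [PySem.List.pyRange_neg_one_cons (by omega : (0:Int) < n - 1)]
      simp
    have hmem : ∀ i ∈ PySem.List.pyRange (n - 1) 0 (-1), 1 ≤ i := by
      intro i hi
      have := PySem.List.mem_pyRange_neg_one.mp hi
      omega
    have h1 : ((PySem.List.pyGet? arr 0).getD 0 * n * k)
        ≡ PySem.Int.mod ((PySem.List.pyGet? arr 0).getD 0 * n * k) 1000000007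
        [ZMOD 1000000007] := (mod_modeq _).symm
    exact ((loop_invariant n k arr hk (PySem.List.pyRange (n - 1) 0 (-1)) hmem
      ((PySem.List.pyGet? arr 0).getD 0 * n * k, 0)
      (PySem.Int.mod ((PySem.List.pyGet? arr 0).getD 0 * n * k) 1000000007, 0)
      h1 (Int.ModEq.refl 0)).2.2 hne).symm ▸ rfl
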